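-- pv_equiv track=rewrite | github.com/etienney/dynamiqs_adaptative | dynamiqs_adaptative/a_posteriori/utils/utils.py | shift_ranges
-- ===== SOURCE A (Python) =====
-- def shift_ranges(ranges):
--     """
--     shift_ranges([(0, 4), (7, 11), (14, 22)]) = [(0, 4), (5, 9), (10, 18)]
--     """
--     new_ranges = []
--     start = 0
--     for old_start, old_end in ranges:
--         length = old_end - old_start
--         new_end = start + length
--         new_ranges.append((start, new_end))
--         start = new_end + 1
--     return new_ranges
-- ===== SOURCE B (Python) =====
-- def shift_ranges(ranges):
--     ranges = list(ranges)
--     lengths = [e - s for s, e in ranges]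
--     starts = [0] * len(lengths)
--     for i in range(1, len(lengths)):
--         starts[i] = starts[i - 1] + lengths[i - 1] + 1
--     return [(st, st + l) for st, l in zip(starts, lengths)]
-- ===== Notes on version B (the rewrite author's own statement) =====
-- stated objective: alternative
-- what changed: Replaced the single accumulator loop by a three-stage pipeline: extract lengths, build a prefix-sum table of start offsets, then zip starts with lengths into the output ranges.
import Mathlib
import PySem

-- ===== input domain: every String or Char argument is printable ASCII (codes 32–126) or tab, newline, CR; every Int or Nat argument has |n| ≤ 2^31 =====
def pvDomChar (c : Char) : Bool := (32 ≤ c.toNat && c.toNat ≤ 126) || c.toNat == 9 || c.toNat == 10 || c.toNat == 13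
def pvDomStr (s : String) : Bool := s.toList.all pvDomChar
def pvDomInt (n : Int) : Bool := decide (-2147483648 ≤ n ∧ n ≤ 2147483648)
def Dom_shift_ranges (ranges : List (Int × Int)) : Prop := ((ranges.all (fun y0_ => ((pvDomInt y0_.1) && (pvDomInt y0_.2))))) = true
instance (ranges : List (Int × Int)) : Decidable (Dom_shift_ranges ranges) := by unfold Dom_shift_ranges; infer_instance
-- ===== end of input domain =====

-- B replaces A's single accumulator loop by a lengths / prefix-sum starts / zip pipeline (alternative decomposition, same cost).


-- ===== PORT A =====
-- loop of A: carries the output accumulator and the running start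
def shiftLoopA : List (Int × Int) → List (Int × Int) → Int → List (Int × Int)
  | [], new_ranges, _ => new_ranges
  | (old_start, old_end) :: rest, new_ranges, start =>
      shiftLoopA rest (new_ranges ++ [(start, start + (old_end - old_start))])
        ((start + (old_end - old_start)) + 1)

def shift_ranges (ranges : List (Int × Int)) : List (Int × Int) :=
  shiftLoopA ranges [] 0

-- ===== PORT B =====
-- B's prefix-sum table of starts: starts[i] = starts[i-1] + lengths[i-1] + 1
def altStarts : List Int → Int → List Int
  | [], _ => []
  | l :: ls, acc => acc :: altStarts ls (acc + l + 1)

def shift_ranges_alt (ranges : List (Int × Int)) : List (Int × Int) :=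
  let lengths := ranges.map (fun p => p.2 - p.1)
  let starts := altStarts lengths 0
  (starts.zip lengths).map (fun p => (p.1, p.1 + p.2))

-- ===== PRECONDITION & SPEC =====
def Spec_shift_ranges (ranges : List (Int × Int)) (out : List (Int × Int)) : Prop := out = shift_ranges_alt ranges
instance (ranges : List (Int × Int)) (out : List (Int × Int)) : Decidable (Spec_shift_ranges ranges out) := by unfold Spec_shift_ranges; infer_instance

-- ===== CLAIM (what is proved, stated in full; the proofs are below) =====
def Claim_equal_shift_ranges : Prop := ∀ (ranges : List (Int × Int)), Dom_shift_ranges ranges → Spec_shift_ranges ranges (shift_ranges ranges)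

-- ===== LEMMAS AND PROOFS =====

-- ===== VERDICT (by name: the statement is the Claim_ definition above) =====
theorem shiftLoopA_eq (ranges : List (Int × Int)) (acc : List (Int × Int)) (start : Int) :
    shiftLoopA ranges acc start =
      acc ++ ((altStarts (ranges.map (fun p => p.2 - p.1)) start).zip
        (ranges.map (fun p => p.2 - p.1))).map (fun p => (p.1, p.1 + p.2)) := by
  induction ranges generalizing acc start with
  | nil => simp [shiftLoopA, altStarts]
  | cons hd tl ih =>
      obtain ⟨s, e⟩ := hd
      simp [shiftLoopA, altStarts, ih]

theorem shift_ranges_spec : Claim_equal_shift_ranges := by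
  intro ranges _
  unfold Spec_shift_ranges shift_ranges shift_ranges_alt
  simp [shiftLoopA_eq]
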